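-- pv_equiv track=rewrite | github.com/pypi-data/pypi-mirror-402 | packages/snapctl/snapctl-1.4.1-py3-none-any.whl/snapctl/commands/snapend.py | _make_byogs_list
-- ===== SOURCE A (Python) =====
-- def _make_byogs_list(byogs: str) -> list:
--     byogs_list = []
--     for byog in byogs.split(','):
--         byog = byog.strip()
--         if len(byog.split(':')) != 2:
--             return []
--         byogs_list.append({
--             'fleet_name': byog.split(':')[0],
--             'image_tag': byog.split(':')[1],
--         })
--     return byogs_list
-- ===== SOURCE B (Python) =====
-- def _make_byogs_list(byogs: str) -> list:
--     def parse(items):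
--         # recursive Option-style parser: None signals an invalid entry anywhere
--         if not items:
--             return []
--         head = items[0].strip()
--         if head.count(':') != 1:
--             return None
--         tail = parse(items[1:])
--         if tail is None:
--             return None
--         fleet, _, tag = head.partition(':')
--         return [{'fleet_name': fleet, 'image_tag': tag}] + tail
--
--     result = parse(byogs.split(','))
--     return [] if result is None else result
-- ===== Notes on version B (the rewrite author's own statement) =====
-- stated objective: alternative
-- what changed: Replaced A's iterative append-accumulator loop (which validates each piece by the length of a colon split, early-returns, and re-splits three times) by a recursive Option-propagating parser that validates each piece by counting colons, extracts the two fields with str.partition, and builds the result front-to-back by consing onto the recursive tail.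
import Mathlib
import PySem

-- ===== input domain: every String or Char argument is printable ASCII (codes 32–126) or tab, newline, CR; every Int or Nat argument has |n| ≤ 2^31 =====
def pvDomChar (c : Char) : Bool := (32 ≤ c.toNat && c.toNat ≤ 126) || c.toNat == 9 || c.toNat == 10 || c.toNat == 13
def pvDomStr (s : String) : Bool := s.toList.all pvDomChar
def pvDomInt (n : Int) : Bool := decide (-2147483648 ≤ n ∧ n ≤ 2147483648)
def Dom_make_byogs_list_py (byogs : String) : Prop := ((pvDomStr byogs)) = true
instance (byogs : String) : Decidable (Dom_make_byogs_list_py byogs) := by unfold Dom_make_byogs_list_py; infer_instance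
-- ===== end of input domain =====

-- B replaces A's iterative append-accumulator loop (len(split(':')) check, early return, triple re-split)
-- by a recursive Option-propagating parser that validates with count(':') == 1 and extracts the two
-- fields with partition(':'), consing onto the recursive tail (objective: alternative).

-- ===== PORT A =====
def pvALoop (bs : List String) (acc : List (List (String × String))) : List (List (String × String)) :=
  match bs with
  | [] => acc
  | b :: rest =>
      let s := PySem.Str.strip b
      if ((PySem.Str.split? s ":").getD []).length ≠ 2 then []
      else pvALoop rest (acc ++ [[("fleet_name", PySem.List.pyGetD ((PySem.Str.split? s ":").getD []) 0 ""),
                                  ("image_tag", PySem.List.pyGetD ((PySem.Str.split? s ":").getD []) 1 "")]])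

def make_byogs_list_py (byogs : String) : List (List (String × String)) :=
  pvALoop ((PySem.Str.split? byogs ",").getD []) []

-- ===== PORT B =====
def pvBRec (items : List String) : Option (List (List (String × String))) :=
  match items with
  | [] => some []
  | b :: rest =>
      let head := PySem.Str.strip b
      if PySem.Str.count head ":" ≠ 1 then none
      else
        match pvBRec rest with
        | none => none
        | some tail =>
            -- fleet, _, tag = head.partition(':') — hand port, exact here: splits at the FIRST ':'
            -- (a ':' is present since count = 1)
            some ([("fleet_name", String.ofList (head.toList.takeWhile (fun ch => ch != ':'))),
                   ("image_tag", String.ofList ((head.toList.dropWhile (fun ch => ch != ':')).drop 1))] :: tail)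

def make_byogs_list_py_alt (byogs : String) : List (List (String × String)) :=
  match pvBRec ((PySem.Str.split? byogs ",").getD []) with
  | none => []
  | some r => r

-- ===== PRECONDITION & SPEC =====
def Spec_make_byogs_list_py (byogs : String) (out : List (List (String × String))) : Prop := out = make_byogs_list_py_alt byogs
instance (byogs : String) (out : List (List (String × String))) : Decidable (Spec_make_byogs_list_py byogs out) := by unfold Spec_make_byogs_list_py; infer_instance

-- ===== CLAIM (what is proved, stated in full; the proofs are below) =====
def Claim_equal_make_byogs_list_py : Prop := ∀ (byogs : String), Dom_make_byogs_list_py byogs → Spec_make_byogs_list_py byogs (make_byogs_list_py byogs)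

-- ===== LEMMAS AND PROOFS =====

-- structural single-character splitter: what PySem.Chars.splitOn computes for a one-char separator
def pvSplitC (c : Char) : List Char → List Char → List (List Char)
  | [], cur => [cur.reverse]
  | x :: rest, cur => if x = c then cur.reverse :: pvSplitC c rest [] else pvSplitC c rest (x :: cur)

theorem splitOn_go_single (c : Char) (l : List Char) : ∀ (fuel : Nat), l.length ≤ fuel →
    ∀ (cur : List Char) (acc : List (List Char)),
    PySem.Chars.splitOn.go [c] fuel l cur acc = acc.reverse ++ pvSplitC c l cur := by
  induction l with
  | nil =>
      intro fuel _ cur acc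
      cases fuel <;> simp [PySem.Chars.splitOn.go, pvSplitC]
  | cons x rest ih =>
      intro fuel h cur acc
      cases fuel with
      | zero => simp at h
      | succ f =>
        have hr : rest.length ≤ f := by simp at h; omega
        by_cases hx : x = c
        · subst hx
          simp [PySem.Chars.splitOn.go, List.isPrefixOf, ih f hr, pvSplitC]
        · simp [PySem.Chars.splitOn.go, List.isPrefixOf, hx, ih f hr, pvSplitC, Ne.symm hx]

theorem splitOn_single (c : Char) (l : List Char) :
    PySem.Chars.splitOn l [c] = pvSplitC c l [] := by
  simpa using splitOn_go_single c l (l.length + 1) (by omega) [] []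

theorem count_go_single (c : Char) (l : List Char) : ∀ (fuel : Nat), l.length ≤ fuel →
    ∀ (acc : Nat), PySem.Chars.count.go [c] fuel l acc = acc + l.count c := by
  induction l with
  | nil => intro fuel _ acc; cases fuel <;> simp [PySem.Chars.count.go]
  | cons x rest ih =>
      intro fuel h acc
      cases fuel with
      | zero => simp at h
      | succ f =>
        have hr : rest.length ≤ f := by simp at h; omega
        by_cases hx : x = c
        · subst hx
          simp [PySem.Chars.count.go, List.isPrefixOf, ih f hr]
          omega
        · simp [PySem.Chars.count.go, List.isPrefixOf, hx, ih f hr, Ne.symm hx]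

theorem count_single (c : Char) (l : List Char) :
    PySem.Chars.count l [c] = l.count c := by
  simp [PySem.Chars.count]
  simpa using count_go_single c l l.length (le_refl _) 0

theorem pvSplitC_length (c : Char) (l : List Char) : ∀ cur,
    (pvSplitC c l cur).length = l.count c + 1 := by
  induction l with
  | nil => intro cur; simp [pvSplitC]
  | cons x rest ih =>
      intro cur
      by_cases hx : x = c
      · subst hx; simp [pvSplitC, ih]
      · simp [pvSplitC, hx, ih]

theorem pvSplitC_zero (c : Char) (l : List Char) : ∀ cur, l.count c = 0 →
    pvSplitC c l cur = [cur.reverse ++ l] := by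
  induction l with
  | nil => intro cur _; simp [pvSplitC]
  | cons x rest ih =>
      intro cur h
      by_cases hx : x = c
      · subst hx; simp at h
      · simp [hx] at h
        simp [pvSplitC, hx, ih _ h]

theorem pvSplitC_one (c : Char) (l : List Char) : ∀ cur, l.count c = 1 →
    pvSplitC c l cur = [cur.reverse ++ l.takeWhile (fun ch => ch != c),
                        (l.dropWhile (fun ch => ch != c)).drop 1] := by
  induction l with
  | nil => intro cur h; simp at h
  | cons x rest ih =>
      intro cur h
      by_cases hx : x = c
      · subst hx
        simp at h
        simp [pvSplitC, List.takeWhile, List.dropWhile, pvSplitC_zero _ rest [] h]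
      · simp [hx] at h
        have hb : (x != c) = true := by simp [hx]
        simp [pvSplitC, hx, List.takeWhile, List.dropWhile, hb, ih _ h]

theorem pvParts_eq (s : String) :
    (PySem.Str.split? s ":").getD [] = (pvSplitC ':' s.toList []).map String.ofList := by
  have h : (":" : String).toList = [':'] := rfl
  simp [PySem.Str.split?, PySem.Chars.split?, h, splitOn_single]

theorem pvCount_str (s : String) : PySem.Str.count s ":" = s.toList.count ':' := by
  have h : (":" : String).toList = [':'] := rfl
  simp [PySem.Str.count, h, count_single]

theorem pvParts_len (s : String) :
    ((PySem.Str.split? s ":").getD []).length = s.toList.count ':' + 1 := by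
  simp [pvParts_eq, pvSplitC_length]

theorem pvParts_two (s : String) (h : s.toList.count ':' = 1) :
    (PySem.Str.split? s ":").getD [] =
      [String.ofList (s.toList.takeWhile (fun ch => ch != ':')),
       String.ofList ((s.toList.dropWhile (fun ch => ch != ':')).drop 1)] := by
  simp [pvParts_eq, pvSplitC_one ':' s.toList [] h]

theorem pvLoop_eq (bs : List String) : ∀ acc,
    pvALoop bs acc = (match pvBRec bs with | none => [] | some r => acc ++ r) := by
  induction bs with
  | nil => intro acc; simp [pvALoop, pvBRec]
  | cons b rest ih =>
      intro acc
      by_cases h : (PySem.Str.strip b).toList.count ':' = 1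
      · have hlen : ¬ (((PySem.Str.split? (PySem.Str.strip b) ":").getD []).length ≠ 2) := by
          rw [pvParts_len]; omega
        have hcnt : ¬ (PySem.Str.count (PySem.Str.strip b) ":" ≠ 1) := by
          rw [pvCount_str]; omega
        simp only [pvALoop, pvBRec]
        rw [if_neg hlen, if_neg hcnt, ih, pvParts_two _ h]
        cases pvBRec rest with
        | none => simp
        | some r => simp [PySem.List.pyGetD, PySem.List.pyGet?, PySem.List.pyIdx?]
      · have hlen : ((PySem.Str.split? (PySem.Str.strip b) ":").getD []).length ≠ 2 := by
          rw [pvParts_len]; omega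
        have hcnt : PySem.Str.count (PySem.Str.strip b) ":" ≠ 1 := by
          rw [pvCount_str]; exact h
        simp only [pvALoop, pvBRec]
        rw [if_pos hlen, if_pos hcnt]

-- ===== VERDICT (by name: the statement is the Claim_ definition above) =====
theorem make_byogs_list_py_spec : Claim_equal_make_byogs_list_py := by
  intro byogs _
  unfold Spec_make_byogs_list_py make_byogs_list_py make_byogs_list_py_alt
  rw [pvLoop_eq]
  cases pvBRec ((PySem.Str.split? byogs ",").getD []) with
  | none => simp
  | some r => simp
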